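-- pv_equiv track=rewrite | github.com/StudyForCoding/ProgrammersLevel | Level2/Lessons77885/wowo0709.py | solution
-- ===== SOURCE A (Python) =====
-- def solution(numbers):
--     answer = []
--     for num in numbers:
--         # 짝수일 때
--         if num % 2 == 0:
--             answer.append(num+1)
--             continue
--         # 홀수일 때
--         binNum = bin(num)[2:]
--
--         idx0r = binNum.rfind('0')
--         if idx0r == -1:
--             binNum = '1' + binNum
--             idx0r = 0
--         else: binNum = binNum[:idx0r] + '1' + binNum[idx0r+1:]
--
--         idx1r = binNum.find('1',idx0r+1)
--         if idx1r == -1: answer.append(int(binNum,2))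
--         else: answer.append(int(binNum[:idx1r] + '0' + binNum[idx1r+1:],2))
--
--     return answer
-- ===== SOURCE B (Python) =====
-- def solution(numbers):
--     # next number with the same popcount: closed-form bitwise step instead of
--     # bin()-string splicing
--     return [num + 1 if num % 2 == 0 else num + ((~num & (num + 1)) >> 1)
--             for num in numbers]
-- ===== Notes on version B (the rewrite author's own statement) =====
-- stated objective: alternative
-- what changed: Replaces A's per-element bin()-string conversion with rfind/find scanning and slice splicing by a closed-form bitwise step: for odd num the lowest zero bit lz = ~num & (num+1) gives the answer num + (lz >> 1) directly.
import Mathlib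
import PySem

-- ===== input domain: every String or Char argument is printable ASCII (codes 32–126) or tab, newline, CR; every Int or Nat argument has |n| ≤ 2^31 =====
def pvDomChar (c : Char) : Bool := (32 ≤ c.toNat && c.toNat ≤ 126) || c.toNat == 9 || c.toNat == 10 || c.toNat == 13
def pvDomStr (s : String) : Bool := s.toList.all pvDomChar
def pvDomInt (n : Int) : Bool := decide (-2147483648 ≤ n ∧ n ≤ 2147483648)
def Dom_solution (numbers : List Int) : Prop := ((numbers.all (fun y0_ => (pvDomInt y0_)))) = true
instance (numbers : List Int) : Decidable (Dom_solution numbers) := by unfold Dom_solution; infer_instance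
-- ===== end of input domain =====

-- B replaces A's bin()-string scanning/splicing by a closed-form bitwise step per element (alternative algorithm, same cost class).

-- ===== PORT A =====
-- hand port of int(s, 2): exact on the strings this program builds (binary digits;
-- none = ValueError, e.g. on the 'b…' strings that bin() of a negative odd input produces)
def pvInt2? (cs : List Char) : Option Int :=
  if cs = [] then none
  else cs.foldl (fun acc c =>
    match acc with
    | none => none
    | some v => if c = '0' then some (2 * v) else if c = '1' then some (2 * v + 1) else none)
    (some 0)

-- per-element body of A's loop (the `continue` = early even branch)
def pvAElem (num : Int) : Int :=
  if PySem.Int.mod num 2 = 0 then num + 1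
  else
    let binNum := PySem.List.slice (PySem.Int.toBinChars0b num) (some 2) none   -- bin(num)[2:]
    let idx0r := PySem.Chars.rfind binNum ['0']
    let p : List Char × Int :=
      if idx0r = -1 then ('1' :: binNum, 0)
      else (PySem.List.slice binNum none (some idx0r) ++ '1' ::
              PySem.List.slice binNum (some (idx0r + 1)) none, idx0r)
    let binNum := p.1
    let idx0r := p.2
    let idx1r := PySem.Chars.findFrom binNum ['1'] (idx0r + 1) none
    if idx1r = -1 then (pvInt2? binNum).getD 0                                  -- getD 0: none = ValueError, outside Pre_
    else (pvInt2? (PySem.List.slice binNum none (some idx1r) ++ '0' ::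
            PySem.List.slice binNum (some (idx1r + 1)) none)).getD 0

def solution (numbers : List Int) : List Int :=
  numbers.foldl (fun answer num => answer ++ [pvAElem num]) []

-- ===== PORT B =====
def solution_alt (numbers : List Int) : List Int :=
  numbers.map (fun num =>
    if PySem.Int.mod num 2 = 0 then num + 1
    else num + (PySem.Int.band (Int.not num) (num + 1) >>> (1 : Nat)))

-- ===== PRECONDITION & SPEC =====
-- Pre_ excludes negative odd elements: there A raises ValueError (bin() keeps the 'b' of '-0b…' in the slice).
def Pre_solution (numbers : List Int) : Prop := ∀ num ∈ numbers, 0 ≤ num ∨ PySem.Int.mod num 2 = 0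
instance (numbers : List Int) : Decidable (Pre_solution numbers) := by unfold Pre_solution; infer_instance
def pvWitness_solution : List Int := [3, -4, 0, 10, 2147483647]

def Spec_solution (numbers : List Int) (out : List Int) : Prop := out = solution_alt numbers
instance (numbers : List Int) (out : List Int) : Decidable (Spec_solution numbers out) := by unfold Spec_solution; infer_instance

-- ===== CLAIM (what is proved, stated in full; the proofs are below) =====
def Claim_equal_solution : Prop := ∀ (numbers : List Int), Dom_solution numbers → Pre_solution numbers → Spec_solution numbers (solution numbers)

-- ===== LEMMAS AND PROOFS =====

def pvBinChars (m : Nat) : List Char :=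
  if h : m < 2 then [Nat.digitChar m]
  else pvBinChars (m / 2) ++ [Nat.digitChar (m % 2)]
decreasing_by exact Nat.div_lt_self (by omega) (by omega)

theorem pvToDigitsCore_eq : ∀ (f n : Nat) (acc : List Char), n < f →
    Nat.toDigitsCore 2 f n acc = pvBinChars n ++ acc := by
  intro f
  induction f with
  | zero => omega
  | succ f ih =>
    intro n acc h
    rw [Nat.toDigitsCore]
    by_cases h2 : n / 2 = 0
    · rw [pvBinChars]
      have hn : n < 2 := by omega
      simp [h2, hn, Nat.mod_eq_of_lt hn]
    · rw [pvBinChars]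
      have hn : ¬ n < 2 := by omega
      simp only [h2, if_false, hn, dif_neg, not_false_iff]
      rw [ih (n / 2) _ (by omega)]
      simp

theorem pvToDigits_eq (m : Nat) : Nat.toDigits 2 m = pvBinChars m := by
  rw [Nat.toDigits, pvToDigitsCore_eq m.succ m [] (Nat.lt_succ_self m)]
  simp

theorem pvBinChars_double (a : Nat) (ha : 1 ≤ a) : pvBinChars (2 * a) = pvBinChars a ++ ['0'] := by
  rw [pvBinChars]
  have : ¬ 2 * a < 2 := by omega
  simp [this, Nat.mul_div_cancel_left, Nat.mul_mod_right, Nat.digitChar]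

theorem pvBinChars_odd (a : Nat) (ha : 1 ≤ a) : pvBinChars (2 * a + 1) = pvBinChars a ++ ['1'] := by
  rw [pvBinChars]
  have : ¬ 2 * a + 1 < 2 := by omega
  have h2 : (2*a+1) / 2 = a := by omega
  have h3 : (2*a+1) % 2 = 1 := by omega
  simp [this, h2, h3, Nat.digitChar]

theorem pvBinChars_ones (k : Nat) (hk : 1 ≤ k) : pvBinChars (2 ^ k - 1) = List.replicate k '1' := by
  induction k with
  | zero => omega
  | succ k ih =>
    by_cases hk1 : k = 0
    · subst hk1; rw [pvBinChars]; norm_num [Nat.digitChar, List.replicate]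
    · have h2 : 2 ^ (k + 1) - 1 = 2 * (2 ^ k - 1) + 1 := by
        have : 2 ≤ 2 ^ k := Nat.one_lt_two_pow_iff.mpr hk1
        omega
      rw [h2, pvBinChars_odd _ (by have := Nat.one_lt_two_pow_iff.mpr hk1; omega),
        ih (by omega), List.replicate_succ']

theorem pvBinChars_form (a k : Nat) (ha : 1 ≤ a) :
    pvBinChars (a * 2 ^ (k + 1) + 2 ^ k - 1) = pvBinChars a ++ '0' :: List.replicate k '1' := by
  induction k with
  | zero =>
    have : a * 2 ^ 1 + 2 ^ 0 - 1 = 2 * a := by omega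
    rw [this, pvBinChars_double a ha]; simp
  | succ k ih =>
    have h2 : a * 2 ^ (k + 2) + 2 ^ (k + 1) - 1 = 2 * (a * 2 ^ (k + 1) + 2 ^ k - 1) + 1 := by
      have : 1 ≤ 2 ^ k := Nat.one_le_two_pow
      ring_nf
      omega
    have hpos : 1 ≤ a * 2 ^ (k + 1) + 2 ^ k - 1 := by
      have h1 : 2 ≤ 2 ^ (k+1) := by have := Nat.one_le_two_pow (n := k); omega
      have h3 : 2 ^ (k+1) ≤ a * 2 ^ (k + 1) := Nat.le_mul_of_pos_left _ ha
      omega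
    rw [h2, pvBinChars_odd _ hpos, ih, List.append_assoc]
    simp [List.replicate_succ']

def pvBitsFrom (v : Int) (cs : List Char) : Int :=
  cs.foldl (fun a c => 2 * a + if c = '1' then 1 else 0) v

theorem pvBitsFrom_append (v : Int) (xs ys : List Char) :
    pvBitsFrom v (xs ++ ys) = pvBitsFrom (pvBitsFrom v xs) ys := by
  simp [pvBitsFrom]

theorem pvBitsFrom_cons (v : Int) (c : Char) (cs : List Char) :
    pvBitsFrom v (c :: cs) = pvBitsFrom (2 * v + if c = '1' then 1 else 0) cs := rfl

theorem pvBitsFrom_ones (v : Int) (k : Nat) :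
    pvBitsFrom v (List.replicate k '1') = v * 2 ^ k + 2 ^ k - 1 := by
  induction k generalizing v with
  | zero => simp [pvBitsFrom]
  | succ k ih =>
    rw [List.replicate_succ, pvBitsFrom_cons, ih]
    simp
    ring

theorem pvBinChars_val (m : Nat) : pvBitsFrom 0 (pvBinChars m) = (m : Int) := by
  induction m using pvBinChars.induct with
  | case1 m h => rw [pvBinChars]; interval_cases m <;> simp [pvBitsFrom, Nat.digitChar]
  | case2 m h ih =>
    rw [pvBinChars, dif_neg h, pvBitsFrom_append, ih]
    have h2 : m % 2 = 0 ∨ m % 2 = 1 := by omega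
    rcases h2 with h2 | h2 <;> simp [pvBitsFrom, h2, Nat.digitChar] <;> omega

theorem pvFoldStep_binary (cs : List Char) (hb : ∀ c ∈ cs, c = '0' ∨ c = '1') (v : Int) :
    cs.foldl (fun acc c =>
      match acc with
      | none => none
      | some v => if c = '0' then some (2 * v) else if c = '1' then some (2 * v + 1) else none)
      (some v) = some (pvBitsFrom v cs) := by
  induction cs generalizing v with
  | nil => rfl
  | cons c t ih =>
    have ht := fun c hc => hb c (List.mem_cons_of_mem _ hc)
    rcases hb c (by simp) with h | h <;> subst h
    · simp only [List.foldl_cons, pvBitsFrom_cons, Char.reduceEq, reduceIte, ite_true,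
        add_zero]
      exact ih ht (2 * v)
    · simp only [List.foldl_cons, pvBitsFrom_cons, Char.reduceEq, reduceIte, ite_true]
      exact ih ht (2 * v + 1)

-- band (~m) (m+1) on a nonnegative m
theorem pvBand_not (m : Nat) :
    PySem.Int.band (Int.not (m : Int)) ((m : Int) + 1) = ((m + 1) - ((m + 1) &&& m) : Nat) := by
  have h1 : Int.not (m : Int) = -(m : Int) - 1 := by
    simp [Int.not]
    omega
  rw [h1, PySem.Int.band]
  rw [if_neg (by omega), if_pos (by omega)]
  norm_num

theorem pvAnd_even_odd (a b : Nat) : (2 * a) &&& (2 * b + 1) = 2 * (a &&& b) := by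
  have h := Nat.bitwise_bit (f := and) rfl false a true b
  simp only [Nat.bit, cond_false, cond_true, Bool.false_and] at h
  simpa [HAnd.hAnd, AndOp.and, Nat.land, two_mul] using h

theorem pvAnd_odd_even (a b : Nat) : (2 * a + 1) &&& (2 * b) = 2 * (a &&& b) := by
  have h := Nat.bitwise_bit (f := and) rfl true a false b
  simp only [Nat.bit, cond_false, cond_true, Bool.true_and] at h
  simpa [HAnd.hAnd, AndOp.and, Nat.land, two_mul] using h

theorem pvAndPred (k u : Nat) (hu : u % 2 = 1) :
    (2 ^ k * u) &&& (2 ^ k * u - 1) = 2 ^ k * u - 2 ^ k := by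
  induction k with
  | zero =>
    obtain ⟨w, hw⟩ : ∃ w, u = 2 * w + 1 := ⟨u / 2, by omega⟩
    subst hw
    simp only [pow_zero, one_mul, Nat.add_sub_cancel]
    rw [pvAnd_odd_even, Nat.and_self]
  | succ k ih =>
    have hu1 : 1 ≤ u := by omega
    have hN1 : 1 ≤ 2 ^ k * u := Nat.mul_pos (by positivity) (by omega)
    have hpow : 2 ^ (k + 1) = 2 * 2 ^ k := by ring
    have e1 : 2 ^ (k + 1) * u = 2 * (2 ^ k * u) := by ring
    have e2 : 2 * (2 ^ k * u) - 1 = 2 * (2 ^ k * u - 1) + 1 := by omega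
    rw [e1, e2, pvAnd_even_odd, ih]
    have h2 : 2 ^ k ≤ 2 ^ k * u := Nat.le_mul_of_pos_right _ (by omega)
    omega

theorem pvIsPrefixOf_single (c : Char) (l : List Char) :
    [c].isPrefixOf l = true ↔ l.head? = some c := by
  cases l with
  | nil => simp [List.isPrefixOf]
  | cons h t =>
    simp only [List.isPrefixOf, List.isPrefixOf_nil_left, Bool.and_true, beq_iff_eq,
      List.head?_cons, Option.some.injEq]
    exact eq_comm

theorem pvRfindGo_eq_neg_one (s : List Char) (c : Char) (j : Nat)
    (h : ∀ i ≤ j, s[i]? ≠ some c) : PySem.Chars.rfind.go s [c] j = -1 := by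
  induction j with
  | zero =>
    rw [PySem.Chars.rfind.go]
    have := h 0 (le_refl 0)
    rw [if_neg]
    intro hp
    exact this (by simpa [List.head?_drop, List.head?_eq_getElem?] using (pvIsPrefixOf_single c s).mp hp)
  | succ j ih =>
    rw [PySem.Chars.rfind.go]
    rw [if_neg, ih (fun i hi => h i (by omega))]
    intro hp
    exact h (j+1) (le_refl _) (by simpa [List.head?_drop, List.head?_eq_getElem?] using (pvIsPrefixOf_single c _).mp hp)

theorem pvRfindGo_eq (s : List Char) (c : Char) (j i0 : Nat) (hij : i0 ≤ j)
    (hhit : s[i0]? = some c) (hlast : ∀ i, i0 < i → i ≤ j → s[i]? ≠ some c) :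
    PySem.Chars.rfind.go s [c] j = (i0 : Int) := by
  induction j with
  | zero =>
    have : i0 = 0 := by omega
    subst this
    rw [PySem.Chars.rfind.go, if_pos ((pvIsPrefixOf_single c s).mpr
      (by simpa [List.head?_drop, List.head?_eq_getElem?] using hhit))]
    simp
  | succ j ih =>
    rw [PySem.Chars.rfind.go]
    by_cases he : i0 = j + 1
    · subst he
      rw [if_pos ((pvIsPrefixOf_single c _).mpr
        (by simpa [List.head?_drop, List.head?_eq_getElem?] using hhit))]
    · rw [if_neg, ih (by omega) (fun i h1 h2 => hlast i h1 (by omega))]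
      intro hp
      exact hlast (j+1) (by omega) (le_refl _)
        (by simpa [List.head?_drop, List.head?_eq_getElem?] using (pvIsPrefixOf_single c _).mp hp)

theorem pvRfind_ones (k : Nat) : PySem.Chars.rfind (List.replicate k '1') ['0'] = -1 := by
  rw [PySem.Chars.rfind]
  apply pvRfindGo_eq_neg_one
  intro i _ h
  rw [List.getElem?_replicate] at h
  split at h <;> simp_all

theorem pvRfind_mid (xs : List Char) (k : Nat) :
    PySem.Chars.rfind (xs ++ '0' :: List.replicate k '1') ['0'] = (xs.length : Int) := by
  rw [PySem.Chars.rfind]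
  apply pvRfindGo_eq _ _ _ _ (by simp)
  · rw [List.getElem?_append_right (le_refl _), Nat.sub_self]
    rfl
  · intro i h1 h2 hc
    rw [List.getElem?_append_right (by omega)] at hc
    rcases Nat.exists_eq_add_of_lt h1 with ⟨d, hd⟩
    subst hd
    rw [show xs.length + d + 1 - xs.length = d + 1 by omega] at hc
    simp only [List.getElem?_cons_succ, List.getElem?_replicate] at hc
    split at hc <;> simp_all

theorem pvFind_head (s : List Char) (c : Char) (h : s.head? = some c) :
    PySem.Chars.find s [c] = 0 := by
  have hinfix : [c] <:+: s := by
    rcases s with _ | ⟨a, t⟩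
    · simp at h
    · simp at h; subst h; exact ⟨[], t, by simp⟩
  have hne := (PySem.Chars.find_ne_neg_one_iff s [c]).mpr hinfix
  have hge : 0 ≤ PySem.Chars.find s [c] := by
    have := PySem.Chars.neg_one_le_find (s := s) (sub := [c])
    omega
  obtain ⟨hpre, hmin⟩ := PySem.Chars.find_spec hge
  by_contra hne0
  have hpos : 0 < (PySem.Chars.find s [c]).toNat := by omega
  exact hmin 0 hpos (by
    rcases s with _ | ⟨a, t⟩
    · simp at h
    · simp at h; subst h; exact ⟨t, by simp⟩)

theorem pvBinChars_binary (m : Nat) : ∀ c ∈ pvBinChars m, c = '0' ∨ c = '1' := by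
  induction m using pvBinChars.induct with
  | case1 m h => rw [pvBinChars]; interval_cases m <;> simp [Nat.digitChar]
  | case2 m h ih =>
    rw [pvBinChars, dif_neg h]
    intro c hc
    rcases List.mem_append.mp hc with hc | hc
    · exact ih c hc
    · have h2 : m % 2 = 0 ∨ m % 2 = 1 := by omega
      rcases h2 with h2 | h2 <;> simp_all [Nat.digitChar]

theorem pvShiftNat (n : Nat) : ((n : Int) >>> (1 : Nat)) = ((n / 2 : Nat) : Int) := by
  have h : ((n : Int) >>> (1 : Nat)) = ((n >>> 1 : Nat) : Int) := rfl
  rw [h, Nat.shiftRight_one]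

-- pvInt2? on a nonempty binary string
theorem pvInt2?_eq (cs : List Char) (hne : cs ≠ []) (hb : ∀ c ∈ cs, c = '0' ∨ c = '1') :
    pvInt2? cs = some (pvBitsFrom 0 cs) := by
  rw [pvInt2?, if_neg hne]
  exact pvFoldStep_binary cs hb 0

theorem pvElem_eq (m : Nat) (hm : m % 2 = 1) :
    pvAElem (m : Int) = (m : Int) + (PySem.Int.band (Int.not (m : Int)) ((m : Int) + 1) >>> (1 : Nat)) := by
  -- decompose m + 1 = 2 ^ k * (2 * a + 1), k ≥ 1
  obtain ⟨k, u, hu, hmu⟩ := Nat.exists_eq_pow_mul_and_not_dvd (n := m + 1) (by omega) 2 (by omega)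
  have hu1 : u % 2 = 1 := by omega
  have hk : 1 ≤ k := by
    by_contra hk0
    have : k = 0 := by omega
    subst this
    simp at hmu
    omega
  obtain ⟨a, ha⟩ : ∃ a, u = 2 * a + 1 := ⟨u / 2, by omega⟩
  subst ha
  -- B-side value
  have hapd := pvAndPred k (2 * a + 1) (by omega)
  have hm1 : (m + 1) &&& m = m + 1 - 2 ^ k := by
    rw [hmu, show m = 2 ^ k * (2 * a + 1) - 1 by omega, hapd]
  have hpk : 2 ^ k ≤ m + 1 := by
    rw [hmu]; exact Nat.le_mul_of_pos_right _ (by omega)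
  have hB : PySem.Int.band (Int.not (m : Int)) ((m : Int) + 1) >>> (1 : Nat)
      = ((2 ^ (k - 1) : Nat) : Int) := by
    rw [pvBand_not, hm1]
    have h1 : m + 1 - (m + 1 - 2 ^ k) = 2 ^ k := Nat.sub_sub_self hpk
    rw [h1, pvShiftNat]
    congr 1
    have h2 : (2 : Nat) ^ k = 2 * 2 ^ (k - 1) := by
      conv_lhs => rw [show k = (k - 1) + 1 by omega]
      ring
    omega
  -- A side
  have hmod : ¬ PySem.Int.mod (m : Int) 2 = 0 := by
    have h : PySem.Int.mod (m : Int) 2 = ((m % 2 : Nat) : Int) := by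
      exact_mod_cast PySem.Int.mod_natCast m 2
    rw [h, hm]
    norm_num
  have hbin : PySem.List.slice (PySem.Int.toBinChars0b (m : Int)) (some 2) none = pvBinChars m := by
    rw [PySem.Int.toBinChars0b, if_neg (by omega), PySem.List.slice_from _ (by norm_num)]
    rw [show (2 : Int).toNat = 2 from rfl, pvToDigits_eq]
    rfl
  have hP : (1 : Nat) ≤ 2 ^ (k - 1) := Nat.one_le_two_pow
  have hkk : (2 : Nat) ^ k = 2 * 2 ^ (k - 1) := by
    conv_lhs => rw [show k = (k - 1) + 1 by omega]
    ring
  by_cases ha0 : a = 0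
  · -- m = 2 ^ k - 1 : the all-ones branch (rfind returns -1)
    subst ha0
    have hm0 : m = 2 ^ k - 1 := by omega
    have hones : pvBinChars m = List.replicate k '1' := by rw [hm0, pvBinChars_ones k hk]
    have hrep : List.replicate k '1' = '1' :: List.replicate (k - 1) '1' := by
      conv_lhs => rw [show k = (k - 1) + 1 by omega]
      rw [List.replicate_succ]
    have hff : PySem.Chars.findFrom ('1' :: List.replicate k '1') ['1'] (0 + 1) none = 1 := by
      have h1 := PySem.Chars.findFrom_natCast ('1' :: List.replicate k '1') ['1'] 1 (by simp)
      norm_num at h1 ⊢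
      rw [h1, pvFind_head _ _ (by rw [hrep]; rfl)]
      norm_num
    have hint : pvInt2? ('1' :: '0' :: List.replicate (k - 1) '1')
        = some (2 * 2 ^ (k - 1) + 2 ^ (k - 1) - 1 : Int) := by
      rw [pvInt2?_eq _ (by simp) (by
        intro c hc
        rcases List.mem_cons.mp hc with h | hc
        · right; exact h
        · rcases List.mem_cons.mp hc with h | h
          · left; exact h
          · right; exact List.eq_of_mem_replicate h)]
      simp only [pvBitsFrom_cons, Char.reduceEq, reduceIte]
      norm_num [pvBitsFrom_ones]
    rw [hB]
    have e3 : PySem.List.slice ('1' :: List.replicate k '1') none (some 1) = ['1'] := by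
      rw [PySem.List.slice_to _ (by norm_num)]
      rfl
    have e4 : PySem.List.slice ('1' :: List.replicate k '1') (some 2) none
        = List.replicate (k - 1) '1' := by
      rw [PySem.List.slice_from _ (by norm_num)]
      rw [show (2 : Int).toNat = 2 from rfl]
      rw [show ('1' :: List.replicate k '1').drop 2 = (List.replicate k '1').drop 1 from rfl,
        List.drop_replicate]
    have hm2 : (m : Int) = 2 * (2 : Int) ^ (k - 1) - 1 := by
      have h1 : m = 2 * 2 ^ (k - 1) - 1 := by omega
      rw [h1, Nat.cast_sub (by omega)]
      push_cast
      ring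
    simp only [pvAElem, if_neg hmod, hbin, hones, pvRfind_ones, if_true, hff]
    norm_num [e3, e4, hint, hm2]
    push_cast
    ring
  · -- a ≥ 1 : rfind hits the lowest 0 bit
    have ha1 : 1 ≤ a := by omega
    have hpow1 : (2 : Nat) ^ (k + 1) = 2 * 2 ^ k := by ring
    have hmform : m = a * 2 ^ (k + 1) + 2 ^ k - 1 := by
      have h1 : m + 1 = a * 2 ^ (k + 1) + 2 ^ k := by rw [hmu]; ring
      omega
    have hform : pvBinChars m = pvBinChars a ++ '0' :: List.replicate k '1' := by
      rw [hmform, pvBinChars_form a k ha1]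
    have hkrep : List.replicate k '1' = '1' :: List.replicate (k - 1) '1' := by
      conv_lhs => rw [show k = (k - 1) + 1 by omega]
      rw [List.replicate_succ]
    have e_rf : PySem.Chars.rfind (pvBinChars a ++ '0' :: List.replicate k '1') ['0']
        = ((pvBinChars a).length : Int) := pvRfind_mid _ k
    have e_ne : ¬(((pvBinChars a).length : Int) = -1) := by omega
    have e5 : PySem.List.slice (pvBinChars a ++ '0' :: List.replicate k '1') none
        (some ((pvBinChars a).length : Int)) = pvBinChars a := by
      rw [PySem.List.slice_to _ (by omega), Int.toNat_natCast, List.take_left]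
    have hdropfact : ∀ c : Char, (pvBinChars a ++ c :: List.replicate k '1').drop
        ((pvBinChars a).length + 1) = List.replicate k '1' := by
      intro c
      rw [List.drop_append, List.drop_of_length_le (by omega),
        show (pvBinChars a).length + 1 - (pvBinChars a).length = 1 by omega]
      simp
    have e6 : PySem.List.slice (pvBinChars a ++ '0' :: List.replicate k '1')
        (some (((pvBinChars a).length : Int) + 1)) none = List.replicate k '1' := by
      rw [PySem.List.slice_from _ (by omega),
        show (((pvBinChars a).length : Int) + 1).toNat = (pvBinChars a).length + 1 by omega]
      exact hdropfact '0'
    have e_ff2 : PySem.Chars.findFrom (pvBinChars a ++ '1' :: List.replicate k '1') ['1']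
        (((pvBinChars a).length : Int) + 1) none = (((pvBinChars a).length : Int) + 1) := by
      rw [show (((pvBinChars a).length : Int) + 1) = (((pvBinChars a).length + 1 : Nat) : Int) by push_cast; ring]
      rw [PySem.Chars.findFrom_natCast _ _ ((pvBinChars a).length + 1) (by simp)]
      rw [hdropfact '1', pvFind_head _ _ (by rw [hkrep]; rfl)]
      norm_num
    have e7 : PySem.List.slice (pvBinChars a ++ '1' :: List.replicate k '1') none
        (some (((pvBinChars a).length : Int) + 1)) = pvBinChars a ++ ['1'] := by
      rw [PySem.List.slice_to _ (by omega),
        show ((((pvBinChars a).length : Int)) + 1).toNat = (pvBinChars a).length + 1 by omega,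
        List.take_append, List.take_of_length_le (by omega),
        show (pvBinChars a).length + 1 - (pvBinChars a).length = 1 by omega]
      rw [hkrep]
      rfl
    have e8 : PySem.List.slice (pvBinChars a ++ '1' :: List.replicate k '1')
        (some ((((pvBinChars a).length : Int)) + 1 + 1)) none = List.replicate (k - 1) '1' := by
      rw [PySem.List.slice_from _ (by omega),
        show ((((pvBinChars a).length : Int)) + 1 + 1).toNat = (pvBinChars a).length + 2 by omega,
        List.drop_append, List.drop_of_length_le (by omega),
        show (pvBinChars a).length + 2 - (pvBinChars a).length = 2 by omega,
        show ('1' :: List.replicate k '1').drop 2 = (List.replicate k '1').drop 1 from rfl,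
        List.drop_replicate]
      simp
    have hint2 : pvInt2? ((pvBinChars a ++ ['1']) ++ '0' :: List.replicate (k - 1) '1')
        = some ((4 * a + 2) * 2 ^ (k - 1) + 2 ^ (k - 1) - 1 : Int) := by
      rw [pvInt2?_eq _ (by simp) (by
        intro c hc
        rcases List.mem_append.mp hc with hc | hc
        · rcases List.mem_append.mp hc with hc | hc
          · exact pvBinChars_binary a c hc
          · right; simpa using hc
        · rcases List.mem_cons.mp hc with h | h
          · left; exact h
          · right; exact List.eq_of_mem_replicate h)]
      rw [List.append_assoc, pvBitsFrom_append, pvBinChars_val]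
      simp only [List.singleton_append, pvBitsFrom_cons, Char.reduceEq, reduceIte]
      rw [pvBitsFrom_ones]
      push_cast
      ring
    have hm2 : (m : Int) = (a : Int) * 2 ^ (k + 1) + 2 ^ k - 1 := by
      rw [hmform, Nat.cast_sub (by have := Nat.one_le_two_pow (n := k); omega)]
      push_cast
      ring
    rw [hB]
    simp only [pvAElem, if_neg hmod, hbin, hform, e_rf, if_neg e_ne, e5, e6, e_ff2,
      List.singleton_append]
    rw [if_neg (by omega)]
    rw [e7, e8, hint2]
    rw [Option.getD_some, hm2]
    have hpow2 : ((2 : Int)) ^ k = 2 * 2 ^ (k - 1) := by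
      conv_lhs => rw [show k = (k - 1) + 1 by omega]
      ring
    have hpow3 : ((2 : Int)) ^ (k + 1) = 4 * 2 ^ (k - 1) := by
      conv_lhs => rw [show k + 1 = (k - 1) + 2 by omega]
      ring
    push_cast
    rw [hpow2, hpow3]
    ring

theorem pvSolutionElem_eq (num : Int) (h : 0 ≤ num ∨ PySem.Int.mod num 2 = 0) :
    pvAElem num = (if PySem.Int.mod num 2 = 0 then num + 1
      else num + (PySem.Int.band (Int.not num) (num + 1) >>> (1 : Nat))) := by
  by_cases hmod : PySem.Int.mod num 2 = 0
  · rw [if_pos hmod, pvAElem, if_pos hmod]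
  · rw [if_neg hmod]
    rcases h with h | h
    · obtain ⟨m, hm⟩ : ∃ m : Nat, num = (m : Int) := ⟨num.toNat, (Int.toNat_of_nonneg h).symm⟩
      subst hm
      have hmc : PySem.Int.mod (m : Int) 2 = ((m % 2 : Nat) : Int) := by
        exact_mod_cast PySem.Int.mod_natCast m 2
      have hm2 : m % 2 = 1 := by
        rw [hmc] at hmod
        omega
      exact pvElem_eq m hm2
    · exact absurd h hmod

-- ===== VERDICT (by name: the statement is the Claim_ definition above) =====
theorem solution_spec : Claim_equal_solution := by
  intro numbers _ hpre
  unfold Spec_solution solution solution_alt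
  rw [PySem.List.foldl_append_singleton_eq_map]
  rw [List.nil_append]
  exact List.map_congr_left (fun num hnum => pvSolutionElem_eq num (hpre num hnum))
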